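-- pv_equiv track=rewrite | github.com/Al-Bee/Compsci-101-Assignment-1 | complete_game.py | board_complete
-- ===== SOURCE A (Python) =====
-- def board_complete(input_tiles):
--
--     if input_tiles[-1] == '':
--         input_tiles_ints = [int(x) for x in input_tiles[0:len(input_tiles)-1]]
--         are_sorted = sorted(input_tiles_ints)
--         if input_tiles_ints == are_sorted:
--             return True
--         else:
--             return False
--     else:
--         return False
-- ===== SOURCE B (Python) =====
-- def board_complete(input_tiles):
--     # Linear scan: last tile must be empty, rest non-decreasing as ints.
--     if not input_tiles or input_tiles[-1] != '':
--         return False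
--     prev = None
--     for s in input_tiles[:-1]:
--         v = int(s)
--         if prev is not None and v < prev:
--             return False
--         prev = v
--     return True
-- ===== Notes on version B (the rewrite author's own statement) =====
-- stated objective: alternative
-- what changed: Replaces the sort-and-compare check with a single linear scan that verifies the parsed tiles are non-decreasing, with an early exit on the first inversion.
import Mathlib
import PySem

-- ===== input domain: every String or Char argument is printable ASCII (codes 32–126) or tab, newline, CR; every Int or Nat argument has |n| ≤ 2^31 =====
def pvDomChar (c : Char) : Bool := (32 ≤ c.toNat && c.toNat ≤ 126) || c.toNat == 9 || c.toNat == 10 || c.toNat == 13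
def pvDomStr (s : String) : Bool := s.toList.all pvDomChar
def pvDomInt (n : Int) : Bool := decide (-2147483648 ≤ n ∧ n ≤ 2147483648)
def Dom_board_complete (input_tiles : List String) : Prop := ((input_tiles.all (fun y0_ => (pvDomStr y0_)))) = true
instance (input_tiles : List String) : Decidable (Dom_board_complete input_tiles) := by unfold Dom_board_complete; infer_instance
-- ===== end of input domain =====

-- B replaces A's sort-and-compare with a single linear scan checking non-decreasing order (objective: alternative).

-- ===== PORT A =====
def board_complete (input_tiles : List String) : Bool :=
  match PySem.List.pyGet? input_tiles (-1) with
  | none => false  -- Python raises IndexError here; excluded by Pre_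
  | some last =>
    if last = "" then
      -- int(x) for each x; within Pre_ every conversion succeeds, so getD 0 is never taken
      let input_tiles_ints :=
        (PySem.List.slice input_tiles (some 0) (some ((input_tiles.length : Int) - 1))).map
          (fun x => (PySem.Int.ofStr? x).getD 0)
      let are_sorted := PySem.List.sorted input_tiles_ints (fun x => x) false
      if input_tiles_ints = are_sorted then true else false
    else false

-- ===== PORT B =====
def bcScan : List String → Option Int → Bool
  | [], _ => true
  | s :: rest, prev =>
    let v := (PySem.Int.ofStr? s).getD 0  -- int(s); within Pre_ always succeeds
    match prev with
    | some p => if v < p then false else bcScan rest (some v)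
    | none => bcScan rest (some v)

def board_complete_alt (input_tiles : List String) : Bool :=
  if input_tiles.isEmpty then false
  else
    match PySem.List.pyGet? input_tiles (-1) with
    | none => false
    | some last =>
      if last ≠ "" then false
      else bcScan (PySem.List.slice input_tiles none (some (-1))) none

-- ===== PRECONDITION & SPEC =====
-- Pre_ excludes exactly A's crashes: the empty list (IndexError on input_tiles[-1]) and,
-- when the last tile is empty, any non-int-parsable earlier tile (ValueError in int(x)).
def Pre_board_complete (input_tiles : List String) : Prop :=
  input_tiles ≠ [] ∧
  (input_tiles.getLast? = some "" →
    ∀ s ∈ input_tiles.dropLast, (PySem.Int.ofStr? s).isSome = true)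
instance (input_tiles : List String) : Decidable (Pre_board_complete input_tiles) := by
  unfold Pre_board_complete; infer_instance
def pvWitness_board_complete : List String := ["1", "2", ""]

def Spec_board_complete (input_tiles : List String) (out : Bool) : Prop := out = board_complete_alt input_tiles
instance (input_tiles : List String) (out : Bool) : Decidable (Spec_board_complete input_tiles out) := by unfold Spec_board_complete; infer_instance

-- ===== CLAIM (what is proved, stated in full; the proofs are below) =====
def Claim_equal_board_complete : Prop := ∀ (input_tiles : List String), Dom_board_complete input_tiles → Pre_board_complete input_tiles → Spec_board_complete input_tiles (board_complete input_tiles)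

-- ===== LEMMAS AND PROOFS =====

-- B's scan with a running bound p succeeds iff p followed by the parsed values is a ≤-chain.
lemma bcScan_chain (xs : List String) :
    ∀ p : Int, bcScan xs (some p) = true ↔
      List.IsChain (· ≤ ·) (p :: xs.map (fun x => (PySem.Int.ofStr? x).getD 0)) := by
  induction xs with
  | nil => intro p; simp [bcScan]
  | cons s rest ih =>
    intro p
    simp only [bcScan, List.map_cons, List.isChain_cons_cons]
    by_cases h : (PySem.Int.ofStr? s).getD 0 < p
    · simp [h, not_le.mpr h]
    · simp [h, not_lt.mp h, ih]

-- B's scan from no bound succeeds iff the parsed values are pairwise non-decreasing.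
lemma bcScan_none_pairwise (xs : List String) :
    bcScan xs none = true ↔
      (xs.map (fun x => (PySem.Int.ofStr? x).getD 0)).Pairwise (· ≤ ·) := by
  cases xs with
  | nil => simp [bcScan]
  | cons s rest =>
    show bcScan rest (some _) = true ↔ _
    rw [bcScan_chain, List.isChain_iff_pairwise, List.map_cons]

-- A's sorted-equality test is exactly the pairwise-≤ condition.
lemma sorted_eq_iff_pairwise (l : List Int) :
    (l = PySem.List.sorted l (fun x => x) false) ↔ l.Pairwise (· ≤ ·) := by
  constructor
  · intro h
    have hp := PySem.List.sorted_pairwise l (fun x : Int => x)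
    rw [← h] at hp
    exact hp
  · intro h
    exact (PySem.List.sorted_eq_self_of_pairwise l (fun x => x) h).symm

-- ===== VERDICT (by name: the statement is the Claim_ definition above) =====
theorem board_complete_spec : Claim_equal_board_complete := by
  intro ts _ hpre
  obtain ⟨hne, -⟩ := hpre
  unfold Spec_board_complete board_complete board_complete_alt
  have hie : ts.isEmpty = false := by simpa using hne
  rw [PySem.List.pyGet?_neg_one, hie]
  cases hl : ts.getLast? with
  | none => exact absurd (List.getLast?_eq_none_iff.mp hl) hne
  | some last =>
    simp only [Bool.false_eq_true, if_false, ne_eq, ite_not]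
    by_cases hlast : last = ""
    · have hlen : 1 ≤ ts.length := List.length_pos_iff.mpr hne
      have hcast : ((ts.length : Int) - 1) = ((ts.length - 1 : Nat) : Int) := by omega
      rw [PySem.List.slice_zero_start, hcast, PySem.List.slice_to_natCast,
          ← List.dropLast_eq_take, PySem.List.slice_to_neg_one]
      have hb : ("" : String) = "" := rfl
      rw [hlast, if_pos hb, if_pos hb]
      have h1 : (ts.dropLast.map (fun x => (PySem.Int.ofStr? x).getD 0) =
            PySem.List.sorted (ts.dropLast.map (fun x => (PySem.Int.ofStr? x).getD 0))
              (fun x => x) false) ↔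
          bcScan ts.dropLast none = true :=
        (sorted_eq_iff_pairwise _).trans (bcScan_none_pairwise ts.dropLast).symm
      by_cases h : ts.dropLast.map (fun x => (PySem.Int.ofStr? x).getD 0) =
          PySem.List.sorted (ts.dropLast.map (fun x => (PySem.Int.ofStr? x).getD 0))
            (fun x => x) false
      · rw [if_pos h]
        exact (h1.mp h).symm
      · rw [if_neg h]
        exact (Bool.eq_false_iff.mpr (mt h1.mpr h)).symm
    · simp [hlast]
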